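-- pv_equiv track=rewrite | github.com/arturoornelasb/tibia-bonelord-469-cipher | investigate_c_ende.py | count_word_hits
-- ===== SOURCE A (Python) =====
-- def count_word_hits(text, wordset, min_len=2):
--     hits = 0
--     for wlen in range(min_len, min(len(text), 20) + 1):
--         for start in range(len(text) - wlen + 1):
--             word = text[start:start+wlen]
--             if word in wordset:
--                 hits += 1
--     return hits
-- ===== SOURCE B (Python) =====
-- def count_word_hits(text, wordset, min_len=2):
--     # Scan the text once per dictionary word instead of enumerating every substring
--     # and testing membership: loop over the distinct words, count overlapping
--     # occurrences of each qualifying word directly.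
--     total = 0
--     cap = min(len(text), 20)
--     for w in set(wordset):
--         L = len(w)
--         if min_len <= L <= cap:
--             for start in range(len(text) - L + 1):
--                 if text[start:start+L] == w:
--                     total += 1
--     return total
-- ===== Notes on version B (the rewrite author's own statement) =====
-- stated objective: alternative
-- what changed: Instead of enumerating every substring of every length min_len..min(len(text),20) and testing membership in wordset, B loops over the distinct dictionary words and counts the overlapping occurrences of each qualifying word by a direct scan of the text.
-- outside the precondition, e.g. on count_word_hits(' cca ', {'ac', 'ca'}, -3): A returns 2, B returns 1; on count_word_hits('ab', {''}, -1): A returns 6, B returns 3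
import Mathlib
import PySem

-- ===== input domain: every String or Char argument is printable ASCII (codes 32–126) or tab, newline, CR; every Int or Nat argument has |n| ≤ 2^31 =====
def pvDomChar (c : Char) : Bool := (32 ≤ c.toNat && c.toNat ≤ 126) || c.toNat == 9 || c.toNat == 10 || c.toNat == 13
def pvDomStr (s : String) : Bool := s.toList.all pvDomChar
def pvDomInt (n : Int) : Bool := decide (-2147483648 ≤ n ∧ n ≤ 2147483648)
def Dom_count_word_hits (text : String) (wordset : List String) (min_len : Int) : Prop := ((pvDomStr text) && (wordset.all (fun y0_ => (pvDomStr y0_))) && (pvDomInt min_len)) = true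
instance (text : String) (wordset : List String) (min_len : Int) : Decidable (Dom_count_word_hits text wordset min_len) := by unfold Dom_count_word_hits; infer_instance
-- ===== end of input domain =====

-- B re-organises the count around the distinct dictionary words (one overlapping-occurrence
-- scan of the text per qualifying word) instead of enumerating every substring of every
-- length and testing membership; return values agree on the stated domain (min_len ≥ 0).

-- ===== PORT A =====
def count_word_hits (text : String) (wordset : List String) (min_len : Int) : Int :=
  (PySem.List.pyRange min_len (min (PySem.Str.len text) 20 + 1) 1).foldl
    (fun hits wlen =>
      (PySem.List.pyRange 0 (PySem.Str.len text - wlen + 1) 1).foldl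
        (fun hits start =>
          if wordset.contains (PySem.Str.slice text (some start) (some (start + wlen)))
          then hits + 1 else hits)
        hits)
    0

-- ===== PORT B =====
def count_word_hits_alt (text : String) (wordset : List String) (min_len : Int) : Int :=
  (PySem.Set.ofList wordset).foldl
    (fun total w =>
      if min_len ≤ PySem.Str.len w ∧ PySem.Str.len w ≤ min (PySem.Str.len text) 20 then
        (PySem.List.pyRange 0 (PySem.Str.len text - PySem.Str.len w + 1) 1).foldl
          (fun total start =>
            if PySem.Str.slice text (some start) (some (start + PySem.Str.len w)) == w
            then total + 1 else total)
          total
      else total)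
    0

-- ===== PRECONDITION & SPEC =====
-- Pre_ restricts min_len (a minimum substring length) to its natural domain min_len ≥ 0:
-- for negative min_len the slice bound start+wlen in A turns into a negative Python index
-- and wraps around, so A additionally counts empty slices and accidental substrings of
-- length len(text)+wlen — behaviour no caller of a length lower bound would specify, and
-- which B would have to replicate with index-wrap arithmetic.  (With an empty wordset
-- nothing can ever be counted, so those inputs stay inside the claim for any min_len.)
def Pre_count_word_hits (text : String) (wordset : List String) (min_len : Int) : Prop :=
  0 ≤ min_len ∨ wordset = []
instance (text : String) (wordset : List String) (min_len : Int) : Decidable (Pre_count_word_hits text wordset min_len) := by unfold Pre_count_word_hits; infer_instance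

def pvWitness_count_word_hits : String × List String × Int := ("abab", ["ab", "b", "ba"], 1)

def Spec_count_word_hits (text : String) (wordset : List String) (min_len : Int) (out : Int) : Prop := out = count_word_hits_alt text wordset min_len
instance (text : String) (wordset : List String) (min_len : Int) (out : Int) : Decidable (Spec_count_word_hits text wordset min_len out) := by unfold Spec_count_word_hits; infer_instance

-- ===== CLAIM (what is proved, stated in full; the proofs are below) =====
def Claim_equal_count_word_hits : Prop := ∀ (text : String) (wordset : List String) (min_len : Int), Dom_count_word_hits text wordset min_len → Pre_count_word_hits text wordset min_len → Spec_count_word_hits text wordset min_len (count_word_hits text wordset min_len)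

-- ===== LEMMAS AND PROOFS =====

-- a counting loop 'if p(x): acc += 1' is the sum of 0/1 indicators
theorem pv_foldl_if_one_sum {α : Type} (l : List α) (p : α → Bool) (a : Int) :
    l.foldl (fun acc x => if p x then acc + 1 else acc) a
      = a + (l.map (fun x => if p x then (1 : Int) else 0)).sum := by
  rw [PySem.List.foldl_congr_mem l _ (fun acc x => acc + (if p x then (1 : Int) else 0)) a
      (by intro acc x _; by_cases h : p x <;> simp [h])]
  exact PySem.List.foldl_add l _ a

-- exchanging the order of a double sum of integers
theorem pv_sum_swap {α β : Type} (xs : List α) (ys : List β) (f : α → β → Int) :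
    (xs.map (fun x => (ys.map (fun y => f x y)).sum)).sum
      = (ys.map (fun y => (xs.map (fun x => f x y)).sum)).sum := by
  induction xs with
  | nil => simp
  | cons a t ih =>
      simp only [List.map_cons, List.sum_cons, ih]
      rw [← PySem.List.sum_map_add_int]

-- on a duplicate-free list, the sum of equality indicators is the membership indicator
theorem pv_sum_eq_ind {α : Type} [BEq α] [LawfulBEq α] (S : List α) (hS : S.Nodup) (x : α) :
    (S.map (fun w => if x == w then (1 : Int) else 0)).sum = if x ∈ S then 1 else 0 := by
  induction S with
  | nil => simp
  | cons a t ih =>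
      rcases List.nodup_cons.mp hS with ⟨ha, ht⟩
      by_cases hx : x = a
      · subst hx
        have hz : (t.map (fun w => if x == w then (1 : Int) else 0)).sum = 0 := by
          apply List.sum_eq_zero
          intro y hy
          rcases List.mem_map.mp hy with ⟨w, hw, rfl⟩
          have : ¬ (x == w) = true := fun h => ha (beq_iff_eq.mp h ▸ hw)
          simp [this]
        simp [hz]
      · have hxa : ¬ (x == a) = true := by simp [hx]
        simp [hxa, ih ht, hx]

-- membership in a list expands to a sum of equality indicators over its distinct elements
theorem pv_contains_expand {α : Type} [BEq α] [LawfulBEq α] (xs : List α) (x : α) :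
    (if xs.contains x then (1 : Int) else 0)
      = ((PySem.Set.ofList xs).map (fun w => if x == w then (1 : Int) else 0)).sum := by
  rw [pv_sum_eq_ind _ (PySem.Set.nodup_ofList xs) x]
  by_cases h : x ∈ xs
  · simp [h, (PySem.Set.mem_ofList xs x).mpr h]
  · have h' : x ∉ PySem.Set.ofList xs := fun hc => h ((PySem.Set.mem_ofList xs x).mp hc)
    simp [h, h']

-- a sum over a duplicate-free list of a function vanishing off one point
theorem pv_single_support {α : Type} [DecidableEq α] (R : List α) (f : α → Int) (a : α)
    (hR : R.Nodup) (h0 : ∀ x ∈ R, x ≠ a → f x = 0) :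
    (R.map f).sum = if a ∈ R then f a else 0 := by
  induction R with
  | nil => simp
  | cons b t ih =>
      rcases List.nodup_cons.mp hR with ⟨hb, ht⟩
      by_cases hab : a = b
      · subst hab
        have : (t.map f).sum = 0 := by
          apply List.sum_eq_zero
          intro y hy
          rcases List.mem_map.mp hy with ⟨w, hw, rfl⟩
          exact h0 w (List.mem_cons_of_mem _ hw) (fun h => hb (h ▸ hw))
        simp [this]
      · have hfb : f b = 0 := h0 b (List.mem_cons_self) (fun h => hab h.symm)
        simp [hfb, ih ht (fun x hx => h0 x (List.mem_cons_of_mem _ hx)), hab]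

-- the slice text[s:s+l] has length l when 0 ≤ s, 0 ≤ l and s+l ≤ len(text)
theorem pv_len_slice (text : String) (s l : Int) (hs : 0 ≤ s) (hl : 0 ≤ l)
    (hsl : s + l ≤ (text.toList.length : Int)) :
    ((PySem.Str.slice text (some s) (some (s + l))).toList.length : Int) = l := by
  have : (PySem.Str.slice text (some s) (some (s + l))).toList
      = PySem.List.slice text.toList (some s) (some (s + l)) := by
    simp [PySem.Str.slice]
  rw [this, PySem.List.slice_of_nonneg _ hs (by omega) (by omega) (by omega)]
  simp only [List.length_take, List.length_drop]
  omega

-- ===== VERDICT (by name: the statement is the Claim_ definition above) =====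
theorem count_word_hits_spec : Claim_equal_count_word_hits := by
  intro text wordset min_len _hdom hpre
  unfold Spec_count_word_hits
  unfold Pre_count_word_hits at hpre
  rcases hpre with hpre | rfl
  case inr =>
    -- empty wordset: nothing is ever counted on either side
    unfold count_word_hits count_word_hits_alt
    rw [PySem.List.foldl_congr_mem _ _ (fun hits (_ : Int) => hits) 0 ?_]
    · rw [PySem.List.foldl_ignore]
      rfl
    · intro acc wlen _
      rw [PySem.List.foldl_congr_mem _ _ (fun hits (_ : Int) => hits) acc
          (by intro a s _; simp), PySem.List.foldl_ignore]
  -- Step A: the substring-enumeration loop is a double sum of membership indicators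
  have hA : count_word_hits text wordset min_len
      = ((PySem.List.pyRange min_len (min (PySem.Str.len text) 20 + 1) 1).map
          (fun wlen =>
            ((PySem.List.pyRange 0 (PySem.Str.len text - wlen + 1) 1).map
              (fun start =>
                if wordset.contains (PySem.Str.slice text (some start) (some (start + wlen)))
                then (1 : Int) else 0)).sum)).sum := by
    unfold count_word_hits
    rw [PySem.List.foldl_congr_mem _ _
        (fun hits wlen => hits +
          ((PySem.List.pyRange 0 (PySem.Str.len text - wlen + 1) 1).map
            (fun start =>
              if wordset.contains (PySem.Str.slice text (some start) (some (start + wlen)))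
              then (1 : Int) else 0)).sum) 0
        (fun acc wlen _ => pv_foldl_if_one_sum _ _ acc),
      PySem.List.foldl_add]
    simp
  -- Step B: the per-word loop is a sum of guarded occurrence counts
  have hB : count_word_hits_alt text wordset min_len
      = ((PySem.Set.ofList wordset).map
          (fun w =>
            if min_len ≤ PySem.Str.len w ∧ PySem.Str.len w ≤ min (PySem.Str.len text) 20 then
              ((PySem.List.pyRange 0 (PySem.Str.len text - PySem.Str.len w + 1) 1).map
                (fun start =>
                  if PySem.Str.slice text (some start) (some (start + PySem.Str.len w)) == w
                  then (1 : Int) else 0)).sum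
            else 0)).sum := by
    unfold count_word_hits_alt
    rw [PySem.List.foldl_congr_mem _ _
        (fun total w => total +
          (if min_len ≤ PySem.Str.len w ∧ PySem.Str.len w ≤ min (PySem.Str.len text) 20 then
            ((PySem.List.pyRange 0 (PySem.Str.len text - PySem.Str.len w + 1) 1).map
              (fun start =>
                if PySem.Str.slice text (some start) (some (start + PySem.Str.len w)) == w
                then (1 : Int) else 0)).sum
          else 0)) 0
        ?_, PySem.List.foldl_add]
    · simp
    · intro acc w _
      by_cases hc : min_len ≤ PySem.Str.len w ∧ PySem.Str.len w ≤ min (PySem.Str.len text) 20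
      · simp only [if_pos hc]
        exact pv_foldl_if_one_sum _ _ acc
      · simp only [if_neg hc, add_zero]
  rw [hA, hB]
  simp only [PySem.Str.len_eq]
  -- Step C1: expand membership over the distinct words
  simp only [pv_contains_expand]
  -- Step C2: swap the start/word sums (inner), then the length/word sums (outer)
  rw [List.map_congr_left (fun wlen _ =>
    pv_sum_swap (PySem.List.pyRange 0 ((text.toList.length : Int) - wlen + 1) 1)
      (PySem.Set.ofList wordset)
      (fun start w =>
        if PySem.Str.slice text (some start) (some (start + wlen)) == w
        then (1 : Int) else 0))]
  rw [pv_sum_swap]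
  -- Step C3: for each word only the length len(w) contributes
  refine congrArg List.sum (List.map_congr_left ?_)
  intro w _
  have h0 : ∀ wlen ∈ PySem.List.pyRange min_len (min (text.toList.length : Int) 20 + 1) 1,
      wlen ≠ (w.toList.length : Int) →
      ((PySem.List.pyRange 0 ((text.toList.length : Int) - wlen + 1) 1).map
        (fun start =>
          if PySem.Str.slice text (some start) (some (start + wlen)) == w
          then (1 : Int) else 0)).sum = 0 := by
    intro wlen hw hne
    apply List.sum_eq_zero
    intro y hy
    rcases List.mem_map.mp hy with ⟨start, hstart, rfl⟩
    rcases PySem.List.mem_pyRange_one.mp hw with ⟨hw1, hw2⟩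
    rcases PySem.List.mem_pyRange_one.mp hstart with ⟨hs1, hs2⟩
    have hwn : wlen ≤ (text.toList.length : Int) := by
      have := min_le_left (text.toList.length : Int) 20
      omega
    have hne2 : ¬ ((PySem.Str.slice text (some start) (some (start + wlen)) == w) = true) := by
      intro h
      have heq := beq_iff_eq.mp h
      have hlen := pv_len_slice text start wlen hs1 (by omega) (by omega)
      rw [heq] at hlen
      exact hne hlen.symm
    simp [hne2]
  rw [pv_single_support _ _ ((w.toList.length : Int))
      (PySem.List.nodup_pyRange_one _ _) h0]
  simp only [PySem.List.mem_pyRange_one, Int.lt_add_one_iff]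
  exact if_congr Iff.rfl rfl rfl
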